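-- pv_equiv track=rewrite | github.com/Yuan-KK/Gibbs-sampler | gibbs.py | continue_num
-- ===== SOURCE A (Python) =====
-- def continue_num(lst):
--     length = len(lst)
--     total_num = []
--     j = 1
--     for i in range(length - 1):
--         if lst[i] == lst[i+1]:
--             j += 1
--         else:
--             total_num.append(j)
--             j = 1
--     total_num.append(j)
--     fremax = max(total_num)
--     return(fremax)
-- ===== SOURCE B (Python) =====
-- def continue_num(lst):
--     n = len(lst)
--     # cut positions: start of each run, plus the end sentinel n
--     cuts = [i for i in range(n) if i == 0 or lst[i] != lst[i - 1]] + [n]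
--     runs = [b - a for a, b in zip(cuts, cuts[1:])]
--     return max(runs, default=1)
-- ===== Notes on version B (the rewrite author's own statement) =====
-- stated objective: alternative
-- what changed: B replaces A's one-pass running counter with a collect-then-reduce decomposition: it builds the list of run-start boundary indices plus an end sentinel and returns the max of successive differences (max with default 1).
import Mathlib
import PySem

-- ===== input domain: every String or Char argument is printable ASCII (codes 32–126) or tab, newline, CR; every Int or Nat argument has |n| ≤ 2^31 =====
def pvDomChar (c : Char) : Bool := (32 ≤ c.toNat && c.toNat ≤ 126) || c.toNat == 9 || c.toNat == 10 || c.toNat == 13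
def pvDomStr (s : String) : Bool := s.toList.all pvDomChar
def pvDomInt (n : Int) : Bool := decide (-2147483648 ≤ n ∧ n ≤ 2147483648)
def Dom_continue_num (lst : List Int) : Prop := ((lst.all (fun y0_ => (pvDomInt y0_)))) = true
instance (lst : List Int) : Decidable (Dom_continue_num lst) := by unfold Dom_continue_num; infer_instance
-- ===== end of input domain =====

-- B computes the run boundaries (cut indices) as a list and takes the max of their
-- successive differences, instead of A's one-pass running counter; objective: alternative decomposition.

-- ===== PORT A =====
def continue_num (lst : List Int) : Int :=
  let length : Int := lst.length
  let st : List Int × Int :=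
    (PySem.List.pyRange 0 (length - 1) 1).foldl
      (fun s i =>
        if PySem.List.pyGet? lst i = PySem.List.pyGet? lst (i + 1) then (s.1, s.2 + 1)
        else (s.1 ++ [s.2], 1)) ([], 1)
  let total_num : List Int := st.1 ++ [st.2]
  -- max(total_num): total_num is always nonempty, so max? is always some
  (PySem.List.max? total_num (fun x => x)).getD 0

-- ===== PORT B =====
def continue_num_alt (lst : List Int) : Int :=
  let n : Int := lst.length
  let cuts : List Int :=
    ((PySem.List.pyRange 0 n 1).filter
      (fun i => i == 0 || !(PySem.List.pyGet? lst i == PySem.List.pyGet? lst (i - 1)))) ++ [n]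
  let runs : List Int :=
    (cuts.zip (PySem.List.slice cuts (some 1) none)).map (fun p => p.2 - p.1)
  PySem.List.maxD runs (fun x => x) 1

-- ===== PRECONDITION & SPEC =====
def Spec_continue_num (lst : List Int) (out : Int) : Prop := out = continue_num_alt lst
instance (lst : List Int) (out : Int) : Decidable (Spec_continue_num lst out) := by unfold Spec_continue_num; infer_instance

-- ===== CLAIM (what is proved, stated in full; the proofs are below) =====
def Claim_equal_continue_num : Prop := ∀ (lst : List Int), Dom_continue_num lst → Spec_continue_num lst (continue_num lst)

-- ===== LEMMAS AND PROOFS =====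

-- run lengths of a list described by its adjacent-equality booleans, starting a run of length j
def runsB : List Bool → Int → List Int
  | [], j => [j]
  | true :: bs, j => runsB bs (j + 1)
  | false :: bs, j => j :: runsB bs 1

-- A's loop body on the adjacent-equality boolean
def stepA (s : List Int × Int) (b : Bool) : List Int × Int :=
  if b then (s.1, s.2 + 1) else (s.1 ++ [s.2], 1)

-- positions (offset by k) of the `false` entries of bs
def falsePos : List Bool → Int → List Int
  | [], _ => []
  | true :: bs, k => falsePos bs (k + 1)
  | false :: bs, k => k :: falsePos bs (k + 1)

-- successive differences, seeded with previous value p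
def dif : Int → List Int → List Int
  | _, [] => []
  | p, c :: cs => (c - p) :: dif c cs

-- the adjacent-equality booleans of lst
def eqs (lst : List Int) : List Bool :=
  (List.range (lst.length - 1)).map (fun k => decide (lst[k]? = lst[k+1]?))

theorem stepA_fold (bs : List Bool) : ∀ (acc : List Int) (j : Int),
    (bs.foldl stepA (acc, j)).1 ++ [(bs.foldl stepA (acc, j)).2] = acc ++ runsB bs j := by
  induction bs with
  | nil => intro acc j; simp [runsB]
  | cons b bs ih =>
    intro acc j
    cases b <;> simp [stepA, runsB, ih]

theorem dif_key (bs : List Bool) : ∀ (p j : Int),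
    dif p (falsePos bs (p + j) ++ [p + j + bs.length]) = runsB bs j := by
  induction bs with
  | nil => intro p j; simp [falsePos, dif, runsB]
  | cons b bs ih =>
    intro p j
    cases b
    · -- b = false
      simp only [falsePos, List.cons_append, dif, runsB, List.length_cons]
      rw [show p + j + ((bs.length + 1 : Nat) : Int) = p + j + 1 + (bs.length : Int) by push_cast; ring]
      rw [ih (p + j) 1]
      rw [show p + j - p = j by ring]
    · -- b = true
      simp only [falsePos, runsB, List.length_cons]
      rw [show p + j + ((bs.length + 1 : Nat) : Int) = p + (j + 1) + (bs.length : Int) by push_cast; ring]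
      rw [show p + j + 1 = p + (j + 1) by ring]
      exact ih p (j + 1)

theorem falsePos_append (as bs : List Bool) : ∀ (k : Int),
    falsePos (as ++ bs) k = falsePos as k ++ falsePos bs (k + as.length) := by
  induction as with
  | nil => intro k; simp [falsePos]
  | cons a as ih =>
    intro k
    cases a <;>
      simp only [List.cons_append, falsePos, List.length_cons, ih (k + 1), List.cons_append] <;>
      rw [show k + ((as.length + 1 : Nat) : Int) = k + 1 + (as.length : Int) by push_cast; ring]

theorem falsePos_map_range (f : Nat → Bool) : ∀ (m : Nat) (k : Int),
    falsePos ((List.range m).map f) k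
      = ((List.range m).filter (fun j => !f j)).map (fun j : Nat => k + (j : Int)) := by
  intro m
  induction m with
  | zero => intro k; simp [falsePos]
  | succ m ih =>
    intro k
    rw [List.range_succ, List.map_append, falsePos_append, List.filter_append]
    cases hfm : f m <;>
      simp [falsePos, ih k, hfm, List.length_map, List.length_range]

theorem dif_zip (cs : List Int) : ∀ (c : Int),
    (((c :: cs).zip cs).map (fun p => p.2 - p.1)) = dif c cs := by
  induction cs with
  | nil => intro c; simp [dif]
  | cons d cs ih => intro c; simp [dif, ih d]

theorem runsB_ne_nil (bs : List Bool) : ∀ j, runsB bs j ≠ [] := by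
  induction bs with
  | nil => intro j; simp [runsB]
  | cons b bs ih => intro j; cases b <;> simp [runsB, ih]

-- A computes max of the run lengths
theorem continue_num_eq (lst : List Int) :
    continue_num lst = (PySem.List.max? (runsB (eqs lst) 1) (fun x => x)).getD 0 := by
  simp only [continue_num]
  cases lst with
  | nil => decide
  | cons x t =>
    have hlen : ((x :: t).length : Int) - 1 = (t.length : Int) := by
      push_cast [List.length_cons]; ring
    rw [hlen, PySem.List.pyRange_zero_nat, List.foldl_map]
    rw [PySem.List.foldl_congr_mem _ _
      (fun s k => stepA s (decide ((x :: t)[k]? = (x :: t)[k+1]?))) _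
      (by
        intro acc k _
        have h1 : ((k : Int) + 1) = ((k + 1 : Nat) : Int) := by push_cast; ring
        rw [h1, PySem.List.pyGet?_natCast, PySem.List.pyGet?_natCast]
        by_cases h : (x :: t)[k]? = (x :: t)[k+1]? <;> simp [h, stepA])]
    rw [← List.foldl_map (f := fun k => decide ((x :: t)[k]? = (x :: t)[k+1]?)) (g := stepA)]
    have heqs : ((List.range t.length).map (fun k => decide ((x :: t)[k]? = (x :: t)[k+1]?))) = eqs (x :: t) := by
      simp [eqs]
    rw [heqs, stepA_fold (eqs (x :: t)) [] 1]
    simp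

-- B computes max of the same run lengths
theorem continue_num_alt_eq (lst : List Int) :
    continue_num_alt lst = PySem.List.maxD (runsB (eqs lst) 1) (fun x => x) 1 := by
  simp only [continue_num_alt]
  cases lst with
  | nil => decide
  | cons x t =>
    have hsym : ∀ (a b : Option Int), (a == b) = decide (b = a) := by
      intro a b
      by_cases h : b = a
      · subst h; simp
      · simp only [decide_eq_false h, beq_eq_false_iff_ne]
        exact fun hh => h hh.symm
    have hcond : (List.range (x :: t).length).filter
        (fun k : Nat => ((k : Int) == 0 || !(PySem.List.pyGet? (x :: t) (k : Int) == PySem.List.pyGet? (x :: t) ((k : Int) - 1))))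
        = 0 :: ((List.range t.length).filter
            (fun j => !(decide ((x :: t)[j]? = (x :: t)[j+1]?)))).map Nat.succ := by
      rw [List.length_cons, List.range_succ_eq_map, List.filter_cons]
      simp only [Nat.cast_zero, beq_self_eq_true, Bool.true_or, if_true]
      rw [List.filter_map]
      congr 1
      congr 1
      apply List.filter_congr
      intro j _
      have h0 : ((((Nat.succ j : Nat) : Int) == 0) = false) := by
        rw [beq_eq_false_iff_ne]
        omega
      have h1 : ((Nat.succ j : Nat) : Int) - 1 = (j : Int) := by push_cast; ring
      have h2 : ((Nat.succ j : Nat) : Int) = ((j + 1 : Nat) : Int) := by push_cast; ring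
      simp only [Function.comp, h0, Bool.false_or]
      rw [h1, h2, PySem.List.pyGet?_natCast, PySem.List.pyGet?_natCast, hsym]
    have hcuts : ((PySem.List.pyRange 0 ((x :: t).length : Int) 1).filter
        (fun i => (i == 0 || !(PySem.List.pyGet? (x :: t) i == PySem.List.pyGet? (x :: t) (i - 1)))))
        = 0 :: falsePos (eqs (x :: t)) 1 := by
      rw [PySem.List.pyRange_zero_nat, List.filter_map]
      rw [show ((List.range (x :: t).length).filter
          ((fun i : Int => (i == 0 || !(PySem.List.pyGet? (x :: t) i == PySem.List.pyGet? (x :: t) (i - 1)))) ∘ (fun k : Nat => (k : Int))))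
          = (List.range (x :: t).length).filter
          (fun k : Nat => ((k : Int) == 0 || !(PySem.List.pyGet? (x :: t) (k : Int) == PySem.List.pyGet? (x :: t) ((k : Int) - 1)))) from rfl]
      rw [hcond]
      have heqs : eqs (x :: t) = (List.range t.length).map
          (fun k => decide ((x :: t)[k]? = (x :: t)[k+1]?)) := by simp [eqs]
      rw [heqs, falsePos_map_range _ t.length 1]
      simp only [Nat.cast_zero, List.map_cons, List.map_map, List.cons.injEq, true_and]
      apply List.map_congr_left
      intro j _
      simp only [Function.comp, Nat.succ_eq_add_one]
      push_cast
      ring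
    rw [hcuts, PySem.List.slice_from_one]
    simp only [List.cons_append, List.tail_cons]
    rw [dif_zip]
    have hlen2 : (((x :: t).length : Int)) = 1 + ((eqs (x :: t)).length : Int) := by
      simp [eqs]; ring
    have hkey := dif_key (eqs (x :: t)) 0 1
    simp only [zero_add] at hkey
    rw [hlen2, hkey]


-- ===== VERDICT (by name: the statement is the Claim_ definition above) =====
theorem continue_num_spec : Claim_equal_continue_num := by
  intro lst _
  unfold Spec_continue_num
  rw [continue_num_eq, continue_num_alt_eq]
  obtain ⟨r, rs, hr⟩ : ∃ r rs, runsB (eqs lst) 1 = r :: rs := by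
    cases h : runsB (eqs lst) 1 with
    | nil => exact absurd h (runsB_ne_nil _ 1)
    | cons r rs => exact ⟨r, rs, rfl⟩
  rw [hr, PySem.List.max?_id_cons]
  simp [PySem.List.maxD, PySem.List.max?_id_cons]
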